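-- pv_equiv track=rewrite | github.com/saramoshtaghi/phd-svd-recsys | Book/Book/SVD/notebook/0815/analysis.py | create_user_bins
-- ===== SOURCE A (Python) =====
-- def create_user_bins(all_users, n_bins=10):
--     """Create n_bins of equal size from sorted users."""
--     sorted_users = sorted(all_users)
--     bin_size = len(sorted_users) // n_bins
--     bins = []
--
--     for i in range(n_bins):
--         start_idx = i * bin_size
--         if i == n_bins - 1:  # Last bin gets any remaining users
--             end_idx = len(sorted_users)
--         else:
--             end_idx = (i + 1) * bin_size
--         bins.append(sorted_users[start_idx:end_idx])
--
--     return bins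
-- ===== SOURCE B (Python) =====
-- def create_user_bins(all_users, n_bins=10):
--     """Create n_bins of equal size from sorted users."""
--     sorted_users = sorted(all_users)
--     bin_size = len(sorted_users) // n_bins
--     bins = []
--     rest = sorted_users
--     k = n_bins
--     while k > 1:
--         bins.append(rest[:bin_size])
--         rest = rest[bin_size:]
--         k -= 1
--     if k == 1:
--         bins.append(rest)
--     return bins
-- ===== Notes on version B (the rewrite author's own statement) =====
-- stated objective: alternative
-- what changed: Replaces A's indexed loop (start/end offsets computed from i with a special-case branch for the last bin) by a peel loop that consumes the sorted list: each iteration appends a bin_size prefix and drops it from the remainder, and the final remainder is appended whole, so no index arithmetic or last-bin conditional remains; the trade-off is that dropping re-copies the remainder each step.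
import Mathlib
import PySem

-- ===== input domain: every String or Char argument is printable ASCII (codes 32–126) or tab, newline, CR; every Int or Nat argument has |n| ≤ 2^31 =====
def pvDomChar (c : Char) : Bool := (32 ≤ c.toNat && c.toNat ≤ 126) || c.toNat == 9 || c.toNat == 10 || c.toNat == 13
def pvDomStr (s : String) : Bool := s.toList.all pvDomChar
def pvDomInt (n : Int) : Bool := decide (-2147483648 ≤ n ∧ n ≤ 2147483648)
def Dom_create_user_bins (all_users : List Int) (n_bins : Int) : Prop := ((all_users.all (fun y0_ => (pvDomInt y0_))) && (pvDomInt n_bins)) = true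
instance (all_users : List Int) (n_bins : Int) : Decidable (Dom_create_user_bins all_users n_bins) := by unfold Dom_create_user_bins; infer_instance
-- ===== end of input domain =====

-- B replaces A's indexed loop with its last-bin conditional by a peel loop that consumes the
-- sorted list, one bin_size prefix per step, appending the final remainder whole (alternative).

-- ===== PORT A =====
def create_user_bins (all_users : List Int) (n_bins : Int) : List (List Int) :=
  let sorted_users := PySem.List.sorted all_users (fun x => x) false
  let bin_size := PySem.Int.floordiv (PySem.List.len sorted_users) n_bins
  (PySem.List.pyRange 0 n_bins 1).foldl (fun bins i =>
    let start_idx := i * bin_size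
    let end_idx := if i == n_bins - 1 then PySem.List.len sorted_users else (i + 1) * bin_size
    bins ++ [PySem.List.slice sorted_users (some start_idx) (some end_idx)]) []

-- ===== PORT B =====
-- the 'while k > 1' peel loop of Source B, with the trailing 'if k == 1' append
def binsLoop (bin_size : Int) (bins : List (List Int)) (rest : List Int) (k : Int) : List (List Int) :=
  if 1 < k then
    binsLoop bin_size (bins ++ [PySem.List.slice rest none (some bin_size)])
      (PySem.List.slice rest (some bin_size) none) (k - 1)
  else if k = 1 then bins ++ [rest] else bins
termination_by k.toNat
decreasing_by omega

def create_user_bins_alt (all_users : List Int) (n_bins : Int) : List (List Int) :=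
  let sorted_users := PySem.List.sorted all_users (fun x => x) false
  let bin_size := PySem.Int.floordiv (PySem.List.len sorted_users) n_bins
  binsLoop bin_size [] sorted_users n_bins

-- ===== PRECONDITION & SPEC =====
-- Pre_: n_bins ≠ 0, exactly where Python's '//' raises ZeroDivisionError in both A and B.
def Pre_create_user_bins (_all_users : List Int) (n_bins : Int) : Prop := n_bins ≠ 0
instance (all_users : List Int) (n_bins : Int) : Decidable (Pre_create_user_bins all_users n_bins) := by unfold Pre_create_user_bins; infer_instance
def pvWitness_create_user_bins : List Int × Int := ([3, 1, 2, 5, 4], 2)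

def Spec_create_user_bins (all_users : List Int) (n_bins : Int) (out : List (List Int)) : Prop := out = create_user_bins_alt all_users n_bins
instance (all_users : List Int) (n_bins : Int) (out : List (List Int)) : Decidable (Spec_create_user_bins all_users n_bins out) := by unfold Spec_create_user_bins; infer_instance

-- ===== CLAIM (what is proved, stated in full; the proofs are below) =====
def Claim_equal_create_user_bins : Prop := ∀ (all_users : List Int) (n_bins : Int), Dom_create_user_bins all_users n_bins → Pre_create_user_bins all_users n_bins → Spec_create_user_bins all_users n_bins (create_user_bins all_users n_bins)

-- ===== LEMMAS AND PROOFS =====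

-- Accumulator-free form of the peel loop.
def binsGo (bin_size : Int) (rest : List Int) (k : Int) : List (List Int) :=
  if k ≤ 0 then []
  else if k = 1 then [rest]
  else [PySem.List.slice rest none (some bin_size)] ++
       binsGo bin_size (PySem.List.slice rest (some bin_size) none) (k - 1)
termination_by k.toNat
decreasing_by omega

theorem binsLoop_eq (bs : Int) (k : Int) (bins : List (List Int)) (rest : List Int) :
    binsLoop bs bins rest k = bins ++ binsGo bs rest k := by
  generalize hkm : k.toNat = m
  induction m generalizing k bins rest with
  | zero =>
    rw [binsLoop, binsGo, if_neg (by omega : ¬ (1 < k)), if_pos (by omega : k ≤ 0),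
      if_neg (by omega : ¬ k = 1)]
    simp
  | succ m ih =>
    rw [binsLoop, binsGo]
    by_cases h2 : 1 < k
    · rw [if_pos h2, if_neg (by omega : ¬ k ≤ 0), if_neg (by omega : ¬ k = 1),
        ih (k - 1) _ _ (by omega)]
      simp
    · have hk1 : k = 1 := by omega
      rw [if_neg h2, if_pos hk1, if_neg (by omega : ¬ k ≤ 0), if_pos hk1]

-- Nat-level description of A's m bins over any list s with bin size b:
-- bin j is a b-sized take at offset j*b, except the last, which is the whole tail.
def aBins (m b : Nat) (s : List Int) : List (List Int) :=
  (List.range m).map (fun j => if j = m - 1 then s.drop (j * b) else (s.drop (j * b)).take b)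

theorem aBins_succ (m b : Nat) (hm : 1 ≤ m) (s : List Int) :
    aBins (m + 1) b s = s.take b :: aBins m b (s.drop b) := by
  unfold aBins
  rw [List.range_succ_eq_map, List.map_cons, List.map_map]
  have h0 : ¬ ((0 : Nat) = m + 1 - 1) := by omega
  simp only [if_neg h0, Nat.zero_mul, List.drop_zero]
  congr 1
  apply List.map_congr_left
  intro j hj
  have hjm : j < m := List.mem_range.mp hj
  simp only [Function.comp]
  have hd : (s.drop b).drop (j * b) = s.drop ((j + 1) * b) := by
    rw [List.drop_drop]; congr 1; ring
  by_cases hc : j = m - 1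
  · rw [if_pos (by omega : j + 1 = m + 1 - 1), if_pos hc, hd]
  · rw [if_neg (by omega : ¬ (j + 1 = m + 1 - 1)), if_neg hc, hd]

theorem binsGo_eq_aBins (m b : Nat) (hm : 1 ≤ m) (s : List Int) :
    binsGo (b : Int) s (m : Int) = aBins m b s := by
  induction m generalizing s with
  | zero => omega
  | succ m ih =>
    rw [binsGo]
    by_cases hm1 : m = 0
    · subst hm1
      simp [aBins]
    · have hk0 : ¬ ((m : Int) + 1 ≤ 0) := by omega
      have hk1 : ¬ ((m : Int) + 1 = 1) := by omega
      push_cast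
      simp only [if_neg hk0, if_neg hk1]
      rw [PySem.List.slice_to_natCast, PySem.List.slice_from_natCast]
      have : (m : Int) + 1 - 1 = (m : Int) := by ring
      rw [this, ih (by omega)]
      rw [aBins_succ m b (by omega)]
      rfl

-- A's fold equals aBins m b s, where m = n.toNat, b = bin_size.toNat (n ≥ 1 so bin_size ≥ 0).
theorem afold_eq_aBins (s : List Int) (n : Int) (hn : 1 ≤ n) (b : Nat)
    (hb : PySem.Int.floordiv (PySem.List.len s) n = (b : Int)) :
    ((PySem.List.pyRange 0 n 1).foldl (fun bins i =>
      bins ++ [PySem.List.slice s (some (i * PySem.Int.floordiv (PySem.List.len s) n))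
        (some (if i == n - 1 then PySem.List.len s
               else (i + 1) * PySem.Int.floordiv (PySem.List.len s) n))]) [])
    = aBins n.toNat b s := by
  rw [PySem.List.foldl_append_singleton_eq_map, List.nil_append, PySem.List.pyRange_one,
      List.map_map, aBins]
  have hsub : ((n : Int) - 0).toNat = n.toNat := by omega
  rw [hsub]
  apply List.map_congr_left
  intro j hj
  have hjm : j < n.toNat := List.mem_range.mp hj
  simp only [Function.comp, zero_add, hb]
  have hlen : PySem.List.len s = ((s.length : Nat) : Int) := by
    simp [PySem.List.len]
  have hmul1 : (j : Int) * (b : Int) = ((j * b : Nat) : Int) := by push_cast; ring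
  by_cases hc : j = n.toNat - 1
  · have hceq : ((j : Int) == n - 1) = true := by
      simp only [beq_iff_eq]; omega
    rw [if_pos hceq, hlen, hmul1, PySem.List.slice_natCast, if_pos hc]
    rw [List.take_of_length_le (by simp)]
  · have hcne : ¬ (((j : Int) == n - 1) = true) := by
      simp only [beq_iff_eq]; omega
    have hmul2 : ((j : Int) + 1) * (b : Int) = ((j * b + b : Nat) : Int) := by push_cast; ring
    rw [if_neg hcne, hmul1, hmul2, PySem.List.slice_natCast, if_neg hc]
    congr 1
    omega

theorem floordiv_nonneg_of (s : List Int) (n : Int) (hn : 1 ≤ n) :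
    0 ≤ PySem.Int.floordiv (PySem.List.len s) n := by
  rw [PySem.Int.floordiv_eq_ediv_of_pos (by omega)]
  apply Int.ediv_nonneg
  · simp [PySem.List.len]
  · omega

-- ===== VERDICT (by name: the statement is the Claim_ definition above) =====
theorem create_user_bins_spec : Claim_equal_create_user_bins := by
  intro all_users n_bins _ hpre
  unfold Spec_create_user_bins create_user_bins create_user_bins_alt
  set s := PySem.List.sorted all_users (fun x => x) false with hs
  by_cases hn : 1 ≤ n_bins
  · have hb0 := floordiv_nonneg_of s n_bins hn
    obtain ⟨b, hb⟩ : ∃ b : Nat, PySem.Int.floordiv (PySem.List.len s) n_bins = (b : Int) :=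
      ⟨_, (Int.toNat_of_nonneg hb0).symm⟩
    have hA := afold_eq_aBins s n_bins hn b hb
    have hB := binsGo_eq_aBins n_bins.toNat b (by omega) s
    rw [Int.toNat_of_nonneg (by omega : (0 : Int) ≤ n_bins)] at hB
    simp only []
    rw [hA, hb, binsLoop_eq, List.nil_append, hB]
  · have hneg : n_bins < 0 := by
      rcases lt_trichotomy n_bins 0 with h | h | h
      · exact h
      · exact absurd h hpre
      · omega
    simp only []
    rw [binsLoop, if_neg (by omega : ¬ (1 < n_bins)), if_neg (by omega : ¬ n_bins = 1)]
    rw [PySem.List.pyRange_one_eq_nil (by omega)]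
    simp
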